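-- pv_equiv track=rewrite | github.com/Sellest-AI/comfyui-serverless-temp | comfyui/custom_nodes/comfys3/s3_client.py | _normalize_s3_path
-- ===== SOURCE A (Python) =====
-- def _normalize_s3_path(path):
--     """Normalize S3 path to prevent double slashes and ensure proper format."""
--     if not path:
--         return ""
--
--     # remove the first / if present
--     if path.startswith('/'):
--         path = path[1:]
--
--     # Replace backslashes with forward slashes
--     normalized = path.replace('\\', '/')
--     # Remove any double slashes
--     while '//' in normalized:
--         normalized = normalized.replace('//', '/')
--     # Remove leading slash if it would create a double slash when joined
--     return normalized
-- ===== SOURCE B (Python) =====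
-- def _normalize_s3_path(path):
--     """Normalize S3 path in a single left-to-right pass: strip one leading '/',
--     turn backslashes into '/', and skip any '/' that directly follows one."""
--     if not path:
--         return ""
--     if path[0] == '/':
--         path = path[1:]
--     out = []
--     for ch in path:
--         if ch == '\\':
--             ch = '/'
--         if not (ch == '/' and out and out[-1] == '/'):
--             out.append(ch)
--     return ''.join(out)
-- ===== Notes on version B (the rewrite author's own statement) =====
-- stated objective: alternative
-- what changed: Replaced the fixpoint loop of repeated whole-string double-slash replacements with a single left-to-right pass that skips a slash whenever the previously emitted character is a slash.
import Mathlib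
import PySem

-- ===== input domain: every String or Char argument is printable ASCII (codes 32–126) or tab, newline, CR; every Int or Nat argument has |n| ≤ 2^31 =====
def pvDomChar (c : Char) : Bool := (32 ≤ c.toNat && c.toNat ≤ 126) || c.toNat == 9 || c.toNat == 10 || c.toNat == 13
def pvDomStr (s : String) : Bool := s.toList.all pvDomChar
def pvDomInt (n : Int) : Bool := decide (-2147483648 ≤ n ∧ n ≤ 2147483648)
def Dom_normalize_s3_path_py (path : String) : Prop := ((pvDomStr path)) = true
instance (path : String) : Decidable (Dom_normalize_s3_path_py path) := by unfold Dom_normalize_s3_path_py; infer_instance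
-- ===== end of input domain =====

-- B replaces the fixpoint loop of repeated whole-string double-slash
-- replacements with one left-to-right pass that skips a slash following an
-- emitted slash (alternative single-pass algorithm).


-- ===== PORT A =====
-- One step of `normalized.replace('//', '/')` characterised structurally
-- (proved equal to PySem.Chars.replace below); used only for the termination
-- measure of the while loop, the port itself calls PySem.Str.replace.
def rep2 : List Char → List Char
  | [] => []
  | [c] => [c]
  | a :: b :: t => if a = '/' ∧ b = '/' then '/' :: rep2 t else a :: rep2 (b :: t)

-- `'//' in s` characterised structurally (for the termination measure).
def hasDbl : List Char → Bool
  | a :: b :: t => (a = '/' && b = '/') || hasDbl (b :: t)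
  | _ => false

theorem rep2_length_lt (s : List Char) (h : hasDbl s = true) :
    (rep2 s).length < s.length := by
  induction s using rep2.induct with
  | case1 => simp [hasDbl] at h
  | case2 c => simp [hasDbl] at h
  | case3 a b t hab ih =>
      have hlen : ∀ l : List Char, (rep2 l).length ≤ l.length := by
        intro l
        induction l using rep2.induct with
        | case1 => simp [rep2]
        | case2 c => simp [rep2]
        | case3 a b t hab ih => simp [rep2, hab]; omega
        | case4 a b t hab ih => simp [rep2, hab] at *; omega
      simp [rep2, hab]
      have := hlen t
      omega
  | case4 a b t hab ih =>
      simp [hasDbl] at h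
      rcases h with h | h
      · exact absurd ⟨h.1, h.2⟩ hab
      · simp [rep2, hab, List.length_cons]
        have := ih h
        simp [List.length_cons] at this ⊢
        omega

theorem replace_eq_rep2_go (fuel : Nat) (l acc : List Char) (h : l.length ≤ fuel) :
    PySem.Chars.replace.go ['/', '/'] ['/'] fuel l acc = acc.reverse ++ rep2 l := by
  induction fuel generalizing l acc with
  | zero =>
      have : l = [] := by cases l <;> simp_all
      subst this; simp [PySem.Chars.replace.go, rep2]
  | succ n ih =>
      cases l with
      | nil => simp [PySem.Chars.replace.go, rep2]
      | cons c t =>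
          by_cases hp : (['/', '/'] : List Char).isPrefixOf (c :: t) = true
          · obtain ⟨u, hu⟩ := List.isPrefixOf_iff_prefix.mp hp
            cases t with
            | nil => simp at hu
            | cons b t' =>
                simp at hu
                obtain ⟨hc, hb, ht⟩ := hu
                subst hc hb ht
                rw [PySem.Chars.replace.go]
                rw [if_pos hp]
                have hdrop : List.drop (['/', '/'] : List Char).length ('/' :: '/' :: u) = u := rfl
                rw [hdrop, ih u _ (by simp at h; omega)]
                simp [rep2]
          · rw [PySem.Chars.replace.go]
            rw [if_neg hp, ih t (c :: acc) (by simp at h; omega)]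
            cases t with
            | nil => simp [rep2]
            | cons b t' =>
                have hcb : ¬ (c = '/' ∧ b = '/') := by
                  intro ⟨h1, h2⟩; subst h1; subst h2
                  simp [List.isPrefixOf] at hp
                simp [rep2, hcb]

theorem replace_slash2 (s : List Char) :
    PySem.Chars.replace s ['/', '/'] ['/'] = rep2 s := by
  rw [PySem.Chars.replace]
  simp [List.isEmpty]
  exact replace_eq_rep2_go s.length s [] le_rfl

theorem find_go_slash2 (l : List Char) (k : Nat) :
    (PySem.Chars.find.go ['/', '/'] l k = -1) ↔ hasDbl l = false := by
  induction l generalizing k with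
  | nil => simp [PySem.Chars.find.go, List.isEmpty, hasDbl]
  | cons c t ih =>
      by_cases hp : (['/', '/'] : List Char).isPrefixOf (c :: t) = true
      · rw [PySem.Chars.find.go]
        simp only [hp, if_true]
        cases t with
        | nil => simp [List.isPrefixOf] at hp
        | cons b t' =>
            simp [List.isPrefixOf] at hp
            obtain ⟨hc, hb⟩ := hp
            subst hc; subst hb
            simp [hasDbl]
      · rw [PySem.Chars.find.go]
        rw [if_neg hp]
        rw [ih (k + 1)]
        cases t with
        | nil => simp [hasDbl]
        | cons b t' =>
            have hfalse : (c = '/' && b = '/') = false := by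
              by_cases h1 : c = '/' <;> by_cases h2 : b = '/' <;> simp_all [List.isPrefixOf]
            simp [hasDbl, hfalse]

theorem isIn_slash2 (s : List Char) :
    PySem.Chars.isIn ['/', '/'] s = hasDbl s := by
  have := find_go_slash2 s 0
  simp [PySem.Chars.isIn, PySem.Chars.find]
  cases h : hasDbl s <;> simp [h] at this ⊢ <;> simp [this]

-- while '//' in normalized: normalized = normalized.replace('//', '/')
def whileCollapse (s : String) : String :=
  if PySem.Str.isIn "//" s then whileCollapse (PySem.Str.replace s "//" "/") else s
termination_by s.toList.length
decreasing_by
  rename_i h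
  rw [PySem.Str.isIn_eq] at h
  have hd : hasDbl s.toList = true := by
    rw [← isIn_slash2]; simpa using h
  simp only [PySem.Str.toList_replace]
  calc (PySem.Chars.replace s.toList "//".toList "/".toList).length
      = (rep2 s.toList).length := by
        have : ("//".toList : List Char) = ['/', '/'] := by decide
        have h2 : ("/".toList : List Char) = ['/'] := by decide
        rw [this, h2, replace_slash2]
    _ < s.toList.length := rep2_length_lt _ hd

def normalize_s3_path_py (path : String) : String :=
  if path = "" then ""
  else
    let path := if PySem.Str.startswith path "/" then PySem.Str.slice path (some 1) none else path
    let normalized := PySem.Str.replace path "\\" "/"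
    whileCollapse normalized

-- ===== PORT B =====
-- the loop body: map '\' to '/', skip a '/' when the last emitted char is '/'
-- (buffer kept in reverse, so out[-1] is the head; joined by a final reverse)
def bstep (out : List Char) (c : Char) : List Char :=
  let c' := if c = '\\' then '/' else c
  if c' = '/' ∧ out.head? = some '/' then out else c' :: out

def normalize_s3_path_py_alt (path : String) : String :=
  if path = "" then ""
  else
    let p := if PySem.Str.pyGet? path 0 = some '/' then PySem.Str.slice path (some 1) none else path
    String.ofList ((p.toList.foldl bstep []).reverse)

-- ===== PRECONDITION & SPEC =====
def Spec_normalize_s3_path_py (path : String) (out : String) : Prop := out = normalize_s3_path_py_alt path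
instance (path : String) (out : String) : Decidable (Spec_normalize_s3_path_py path out) := by unfold Spec_normalize_s3_path_py; infer_instance

-- ===== CLAIM (what is proved, stated in full; the proofs are below) =====
def Claim_equal_normalize_s3_path_py : Prop := ∀ (path : String), Dom_normalize_s3_path_py path → Spec_normalize_s3_path_py path (normalize_s3_path_py path)

-- ===== LEMMAS AND PROOFS =====

-- single-char substitution: replace s ['\'] ['/'] is a map
def sl (c : Char) : Char := if c = '\\' then '/' else c

theorem replace_bs_go (fuel : Nat) (l acc : List Char) (h : l.length ≤ fuel) :
    PySem.Chars.replace.go ['\\'] ['/'] fuel l acc = acc.reverse ++ l.map sl := by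
  induction fuel generalizing l acc with
  | zero =>
      have : l = [] := by cases l <;> simp_all
      subst this; simp [PySem.Chars.replace.go]
  | succ n ih =>
      cases l with
      | nil => simp [PySem.Chars.replace.go]
      | cons c t =>
          rw [PySem.Chars.replace.go]
          by_cases hc : c = '\\'
          · subst hc
            rw [if_pos (by simp [List.isPrefixOf])]
            have hdrop : List.drop (['\\'] : List Char).length ('\\' :: t) = t := rfl
            rw [hdrop, ih t _ (by simp at h; omega)]
            simp [sl]
          · rw [if_neg (by simp [List.isPrefixOf]; intro h; exact hc h.symm)]
            rw [ih t (c :: acc) (by simp at h; omega)]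
            simp [sl, hc]

theorem replace_bs (s : List Char) :
    PySem.Chars.replace s ['\\'] ['/'] = s.map sl := by
  rw [PySem.Chars.replace]
  simp [List.isEmpty]
  exact replace_bs_go s.length s [] le_rfl

-- one-pass collapse with a "last emitted char was '/'" flag
def cc : Bool → List Char → List Char
  | _, [] => []
  | b, c :: t => if c = '/' ∧ b then cc b t else c :: cc (c = '/') t

theorem cc_rep2 (b : Bool) (s : List Char) : cc b (rep2 s) = cc b s := by
  induction s using rep2.induct generalizing b with
  | case1 => rfl
  | case2 c => rfl
  | case3 a b' t hab ih =>
      obtain ⟨ha, hb'⟩ := hab; subst ha; subst hb'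
      cases b with
      | true => simp [rep2, cc, ih]
      | false => simp [rep2, cc, ih]
  | case4 a b' t hab ih =>
      by_cases ha : a = '/'
      · subst ha
        have hb2 : ¬ b' = '/' := fun h => hab ⟨rfl, h⟩
        cases b with
        | true => simp [rep2, cc, hb2, ih]
        | false => simp [rep2, cc, hb2, ih]
      · simp [rep2, cc, ha, ih]

theorem cc_fixed (s : List Char) (b : Bool)
    (hd : hasDbl s = false) (hb : b = true → s.head? ≠ some '/') :
    cc b s = s := by
  induction s generalizing b with
  | nil => rfl
  | cons c t ih =>
      have hguard : ¬ (c = '/' ∧ b = true) := by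
        intro ⟨h1, h2⟩; exact hb h2 (by simp [h1])
      have ht : hasDbl t = false := by
        cases t with
        | nil => rfl
        | cons d t' => simp [hasDbl] at hd ⊢; tauto
      rw [cc]
      rw [if_neg (by simpa using hguard)]
      congr 1
      apply ih _ ht
      intro hcb
      cases t with
      | nil => simp
      | cons d t' =>
          simp at hcb
          simp [hasDbl, hcb] at hd
          simp [hd.1]

theorem whileCollapse_eq_cc (s : String) : (whileCollapse s).toList = cc false s.toList := by
  rw [whileCollapse]
  by_cases h : PySem.Str.isIn "//" s = true
  · rw [if_pos h]
    have := whileCollapse_eq_cc (PySem.Str.replace s "//" "/")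
    rw [this, PySem.Str.toList_replace]
    have h2 : ("//".toList : List Char) = ['/', '/'] := by decide
    have h3 : ("/".toList : List Char) = ['/'] := by decide
    rw [h2, h3, replace_slash2, cc_rep2]
  · rw [if_neg h]
    rw [PySem.Str.isIn_eq] at h
    have hd : hasDbl s.toList = false := by
      have := isIn_slash2 s.toList
      simp at h
      rw [← this]
      simpa using h
    exact (cc_fixed s.toList false hd (by simp)).symm
termination_by s.toList.length
decreasing_by
  rw [PySem.Str.isIn_eq] at h
  have hd : hasDbl s.toList = true := by
    rw [← isIn_slash2]; simpa using h
  simp only [PySem.Str.toList_replace]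
  have h2 : ("//".toList : List Char) = ['/', '/'] := by decide
  have h3 : ("/".toList : List Char) = ['/'] := by decide
  rw [h2, h3, replace_slash2]
  exact rep2_length_lt _ hd

-- B's foldl buffer, characterised with the same flag
theorem foldl_bstep (l acc : List Char) :
    (l.foldl bstep acc).reverse
      = acc.reverse ++ cc (acc.head? = some '/') (l.map sl) := by
  induction l generalizing acc with
  | nil => simp [cc]
  | cons c t ih =>
      simp only [List.foldl_cons, List.map_cons]
      by_cases hg : sl c = '/' ∧ acc.head? = some '/'
      · have hb : bstep acc c = acc := by
          simp only [bstep]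
          exact if_pos ⟨hg.1, hg.2⟩
        rw [hb, ih]
        simp [cc, hg.1, hg.2]
      · have hb : bstep acc c = sl c :: acc := by
          simp only [bstep]
          exact if_neg hg
        rw [hb, ih]
        by_cases hcs : sl c = '/'
        · have hh : ¬ acc.head? = some '/' := fun h => hg ⟨hcs, h⟩
          simp [cc, hcs, hh]
        · simp [cc, hcs]

-- startswith '/' agrees with path[0] == '/' on nonempty strings
theorem startswith_head (s : String) (h : s.toList ≠ []) :
    (PySem.Str.startswith s "/" = true) ↔ (PySem.Str.pyGet? s 0 = some '/') := by
  rw [PySem.Str.startswith_eq, PySem.Str.pyGet?_eq]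
  obtain ⟨c, t, hs⟩ := List.exists_cons_of_ne_nil h
  rw [hs]
  have h1 : ("/".toList : List Char) = ['/'] := by decide
  rw [h1]
  simp [PySem.Chars.startswith, List.isPrefixOf, PySem.Chars.pyGet?, PySem.List.pyGet?, PySem.List.pyIdx?]
  exact eq_comm

-- ===== VERDICT (by name: the statement is the Claim_ definition above) =====
theorem normalize_s3_path_py_spec : Claim_equal_normalize_s3_path_py := by
  intro path _
  unfold Spec_normalize_s3_path_py normalize_s3_path_py normalize_s3_path_py_alt
  by_cases hempty : path = ""
  · simp [hempty]
  · rw [if_neg hempty, if_neg hempty]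
    have hne : path.toList ≠ [] := fun h =>
      hempty (String.toList_injective (by rw [h]; rfl))
    have hsw : (if PySem.Str.startswith path "/" then PySem.Str.slice path (some 1) none else path)
        = (if PySem.Str.pyGet? path 0 = some '/' then PySem.Str.slice path (some 1) none else path) := by
      by_cases h : PySem.Str.startswith path "/" = true
      · rw [if_pos h, if_pos ((startswith_head path hne).mp h)]
      · rw [if_neg h, if_neg (fun hc => h ((startswith_head path hne).mpr hc))]
    rw [← hsw]
    set p := if PySem.Str.startswith path "/" then PySem.Str.slice path (some 1) none else path with hp
    apply String.toList_injective
    rw [whileCollapse_eq_cc]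
    rw [PySem.Str.toList_replace]
    have h2 : ("\\".toList : List Char) = ['\\'] := by decide
    have h3 : ("/".toList : List Char) = ['/'] := by decide
    rw [h2, h3, replace_bs]
    have hfb := foldl_bstep p.toList []
    simp only [List.head?_nil, List.reverse_nil, List.nil_append] at hfb
    rw [String.toList_ofList, hfb]
    simp
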